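-- pv_equiv track=rewrite | github.com/QuadDarv1ne/maestro7it_education | leetcode/Medium/python/1733. Minimum Number of People to Teach.py | minimumTeachings
-- ===== SOURCE A (Python) =====
-- def minimumTeachings(n, languages, friendships):
--     """
--     Найти минимальное число людей, которым нужно преподать один язык,
--     чтобы все друзья могли общаться (имели хотя бы один общий язык).
--     Жадный выбор: выбрать язык, который максимально известен среди
--     проблемных пользователей, и обучить остальных.
--     """
--     # Найти проблемные дружбы и собрать проблемных пользователей
--     bad = set()
--     for u, v in friendships:
--         if not set(languages[u - 1]).intersection(languages[v - 1]):
--             bad.add(u - 1)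
--             bad.add(v - 1)
--     if not bad:
--         return 0
--     # Считаем, кто какой язык знает
--     cnt = [0] * (n + 1)
--     for u in bad:
--         for lang in languages[u]:
--             cnt[lang] += 1
--     # Выбираем язык с максимальным покрытием
--     max_known = max(cnt)
--     return len(bad) - max_known
-- ===== SOURCE B (Python) =====
-- def minimumTeachings(n, languages, friendships):
--     # Find problematic users exactly as the problem states.
--     bad = set()
--     for u, v in friendships:
--         if not set(languages[u - 1]).intersection(languages[v - 1]):
--             bad.add(u - 1)
--             bad.add(v - 1)
--     if not bad:
--         return 0
--     # Minimize over candidate languages: people to teach = bad users not knowing lang.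
--     best = len(bad)
--     for lang in range(1, n + 1):
--         need = sum(1 for u in bad if lang not in languages[u])
--         if need < best:
--             best = need
--     return best
-- ===== Notes on version B (the rewrite author's own statement) =====
-- stated objective: alternative
-- what changed: The coverage-accumulation phase (a cnt array tallied per known language of each bad user, answer = len(bad) - max(cnt)) is replaced by a minimization over candidate languages 1..n: for each language count the bad users who do not know it and keep the running minimum, so no counter array is built.
-- outside the precondition, e.g. on minimumTeachings(1, [[1, 1], []], [[1, 2]]): A returns 0, B returns 1; on minimumTeachings(1, [[1], []], [[-1, 2]]): A returns 1, B returns 1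
import Mathlib
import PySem

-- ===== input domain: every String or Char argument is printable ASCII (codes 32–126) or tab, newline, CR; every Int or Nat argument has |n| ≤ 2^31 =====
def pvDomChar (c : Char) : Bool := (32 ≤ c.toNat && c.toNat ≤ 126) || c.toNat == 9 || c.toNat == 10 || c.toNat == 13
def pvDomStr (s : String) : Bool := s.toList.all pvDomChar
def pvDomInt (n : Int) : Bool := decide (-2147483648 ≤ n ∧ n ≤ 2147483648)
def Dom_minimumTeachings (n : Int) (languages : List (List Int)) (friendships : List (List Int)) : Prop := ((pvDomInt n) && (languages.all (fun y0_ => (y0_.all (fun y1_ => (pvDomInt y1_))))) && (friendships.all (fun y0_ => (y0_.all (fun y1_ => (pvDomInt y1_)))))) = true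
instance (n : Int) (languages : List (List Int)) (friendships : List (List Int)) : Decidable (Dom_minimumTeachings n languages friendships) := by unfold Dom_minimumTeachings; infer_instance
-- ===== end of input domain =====

-- B replaces A's coverage-count array (answer = len(bad) - max(cnt)) by a direct
-- minimization over candidate languages 1..n of the number of bad users not knowing
-- that language; same cost class, no counter array (objective: alternative).

-- ===== PORT A =====
-- languages[j] (Python indexing); total form used under Pre_ (index always in range there)
def pvLangs (languages : List (List Int)) (j : Int) : List Int :=
  (PySem.List.pyGet? languages j).getD []

-- one step of the first loop: 'for u, v in friendships: if not set(languages[u-1]) & set(languages[v-1]): bad.add(u-1); bad.add(v-1)'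
-- (this first pass is shared verbatim by both Pythons, so both ports use it)
def pvBadStep (languages : List (List Int)) (s : PySem.Set Int) (f : List Int) : PySem.Set Int :=
  match f with
  | [u, v] =>
    if (pvLangs languages (u-1)).any (fun x => (pvLangs languages (v-1)).contains x) then s
    else PySem.Set.add (PySem.Set.add s (u-1)) (v-1)
  | _ => s

def minimumTeachings (n : Int) (languages : List (List Int)) (friendships : List (List Int)) : Int :=
  let bad : PySem.Set Int := friendships.foldl (pvBadStep languages) PySem.Set.empty
  if bad = [] then 0
  else
    -- cnt = [0]*(n+1); for u in bad: for lang in languages[u]: cnt[lang] += 1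
    let cnt : List Int := bad.foldl (fun c u =>
        (pvLangs languages u).foldl
          (fun c lang => PySem.List.pySetD c lang (PySem.List.pyGetD c lang 0 + 1)) c)
      (List.replicate (n+1).toNat 0)
    -- return len(bad) - max(cnt)
    ((bad.length : Int)) - ((PySem.List.max? cnt (fun x => x)).getD 0)

-- ===== PORT B =====
def minimumTeachings_alt (n : Int) (languages : List (List Int)) (friendships : List (List Int)) : Int :=
  let bad : PySem.Set Int := friendships.foldl (pvBadStep languages) PySem.Set.empty
  if bad = [] then 0
  else
    -- best = len(bad); for lang in range(1, n+1): need = sum(1 for u in bad if lang not in languages[u]); best = min(best, need)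
    (PySem.List.pyRange 1 (n+1) 1).foldl
      (fun best lang =>
        let need : Int := (bad.countP (fun u => !((pvLangs languages u).contains lang)) : Int)
        if need < best then need else best)
      ((bad.length : Int))

-- ===== PRECONDITION & SPEC =====
-- Pre_ admits the problem's natural domain (LeetCode 1733 constraints: nonnegative n,
-- friendships as pairs of valid 1-based user ids, duplicate-free language lists with codes in
-- 1..n) and, in addition, every input on which all friendship pairs already share a language
-- (both programs return 0 there whatever the rest looks like).  Outside it A may raise
-- (IndexError/ValueError/max of empty), wrap negative indices, or (on duplicate-carrying
-- language lists) return a miscount from its multiplicity-based cnt array.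
def Pre_minimumTeachings (n : Int) (languages : List (List Int)) (friendships : List (List Int)) : Prop :=
  (0 ≤ n ∧
    (∀ f ∈ friendships, f.length = 2 ∧ ∀ x ∈ f, 1 ≤ x ∧ x ≤ (languages.length : Int)) ∧
    (∀ L ∈ languages, L.Nodup ∧ ∀ x ∈ L, 1 ≤ x ∧ x ≤ n)) ∨
  (∀ f ∈ friendships, f.length = 2 ∧
    ∃ x ∈ (PySem.List.pyGet? languages (f.getD 0 0 - 1)).getD [],
      x ∈ (PySem.List.pyGet? languages (f.getD 1 0 - 1)).getD [])
instance (n : Int) (languages : List (List Int)) (friendships : List (List Int)) : Decidable (Pre_minimumTeachings n languages friendships) := by unfold Pre_minimumTeachings; infer_instance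

def pvWitness_minimumTeachings : Int × List (List Int) × List (List Int) := (2, [[1], [2]], [[1, 2]])

def Spec_minimumTeachings (n : Int) (languages : List (List Int)) (friendships : List (List Int)) (out : Int) : Prop := out = minimumTeachings_alt n languages friendships
instance (n : Int) (languages : List (List Int)) (friendships : List (List Int)) (out : Int) : Decidable (Spec_minimumTeachings n languages friendships out) := by unfold Spec_minimumTeachings; infer_instance

-- ===== CLAIM (what is proved, stated in full; the proofs are below) =====
def Claim_equal_minimumTeachings : Prop := ∀ (n : Int) (languages : List (List Int)) (friendships : List (List Int)), Dom_minimumTeachings n languages friendships → Pre_minimumTeachings n languages friendships → Spec_minimumTeachings n languages friendships (minimumTeachings n languages friendships)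

-- ===== LEMMAS AND PROOFS =====

-- if every friendship pair already shares a language, the bad set stays empty
lemma pv_bad_nil (languages : List (List Int)) :
    ∀ (fs : List (List Int)),
      (∀ f ∈ fs, f.length = 2 ∧
        ∃ x ∈ (PySem.List.pyGet? languages (f.getD 0 0 - 1)).getD [],
          x ∈ (PySem.List.pyGet? languages (f.getD 1 0 - 1)).getD []) →
      fs.foldl (pvBadStep languages) PySem.Set.empty = (PySem.Set.empty : PySem.Set Int) := by
  intro fs
  induction fs with
  | nil => intro _; rfl
  | cons f fs ih =>
    intro h
    obtain ⟨hlen, x, hx1, hx2⟩ := h f List.mem_cons_self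
    match f, hlen with
    | [u, v], _ =>
      have hcond : (pvLangs languages (u-1)).any
          (fun y => (pvLangs languages (v-1)).contains y) = true := by
        rw [List.any_eq_true]
        refine ⟨x, by simpa [pvLangs] using hx1, by simpa [pvLangs, List.contains_eq_mem] using hx2⟩
      simp only [List.foldl_cons, pvBadStep, hcond, if_true]
      exact ih (fun g hg => h g (List.mem_cons_of_mem _ hg))

-- members of the bad set are valid 0-based user indices
lemma pv_bad_mem (languages : List (List Int)) :
    ∀ (fs : List (List Int)) (init : PySem.Set Int),
      (∀ f ∈ fs, f.length = 2 ∧ ∀ x ∈ f, 1 ≤ x ∧ x ≤ (languages.length : Int)) →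
      (∀ y ∈ init, 0 ≤ y ∧ y < (languages.length : Int)) →
      ∀ y ∈ fs.foldl (pvBadStep languages) init, 0 ≤ y ∧ y < (languages.length : Int) := by
  intro fs
  induction fs with
  | nil => intro init _ hinit y hy; exact hinit y hy
  | cons f fs ih =>
    intro init hf hinit y hy
    refine ih _ (fun g hg => hf g (List.mem_cons_of_mem _ hg)) ?_ y hy
    intro z hz
    obtain ⟨hlen, hbound⟩ := hf f List.mem_cons_self
    match f, hlen with
    | [u, v], _ =>
      simp only [pvBadStep] at hz
      split at hz
      · exact hinit z hz
      · rcases (PySem.Set.mem_add _ _ _).1 hz with hz' | hz'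
        · rcases (PySem.Set.mem_add _ _ _).1 hz' with hz'' | hz''
          · exact hinit z hz''
          · have := hbound u (by simp); subst hz''; omega
        · have := hbound v (by simp); subst hz'; omega

lemma pv_langs_mem (languages : List (List Int)) (u : Int) (h0 : 0 ≤ u)
    (h1 : u < (languages.length : Int)) : pvLangs languages u ∈ languages := by
  have hlt : u.toNat < languages.length := by omega
  rw [pvLangs, PySem.List.pyGet?_of_nonneg _ h0, List.getElem?_eq_getElem hlt]
  exact List.getElem_mem hlt

-- inner bump loop: 'for lang in L: cnt[lang] += 1' adds the 0/1 indicator of membership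
lemma pv_bump :
    ∀ (L : List Int) (c : List Int), L.Nodup → (∀ x ∈ L, 1 ≤ x ∧ x < (c.length : Int)) →
      (L.foldl (fun c lang => PySem.List.pySetD c lang (PySem.List.pyGetD c lang 0 + 1)) c).length = c.length ∧
      ∀ i : Nat, i < c.length →
        (L.foldl (fun c lang => PySem.List.pySetD c lang (PySem.List.pyGetD c lang 0 + 1)) c).getD i 0
          = c.getD i 0 + (if (i : Int) ∈ L then 1 else 0) := by
  intro L
  induction L with
  | nil => intro c _ _; simp
  | cons x L ih =>
    intro c hnd hb
    obtain ⟨hx1, hxlen⟩ := hb x List.mem_cons_self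
    have hx0 : 0 ≤ x := by omega
    have hxN : x.toNat < c.length := by omega
    have hstep : PySem.List.pySetD c x (PySem.List.pyGetD c x 0 + 1)
        = c.set x.toNat (c.getD x.toNat 0 + 1) := by
      rw [PySem.List.pySetD_of_nonneg _ _ hx0,
        PySem.List.pyGetD_eq_getElem _ _ hx0 (by exact_mod_cast hxlen),
        List.getD_eq_getElem _ _ hxN]
    simp only [List.foldl_cons, hstep]
    have hlen' : (c.set x.toNat (c.getD x.toNat 0 + 1)).length = c.length := by simp
    obtain ⟨ihlen, ihget⟩ := ih (c.set x.toNat (c.getD x.toNat 0 + 1)) (List.nodup_cons.mp hnd).2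
      (by intro z hz; have := hb z (List.mem_cons_of_mem _ hz); omega)
    refine ⟨by rw [ihlen, hlen'], ?_⟩
    intro i hi
    rw [ihget i (by omega)]
    by_cases hix : i = x.toNat
    · have hxi : x = (i : Int) := by omega
      have hniL : ((i : Int)) ∉ L := by rw [← hxi]; exact (List.nodup_cons.mp hnd).1
      have h1 : (if ((i : Int)) ∈ L then (1 : Int) else 0) = 0 := if_neg hniL
      have h2 : (if ((i : Int)) ∈ x :: L then (1 : Int) else 0) = 1 :=
        if_pos (show ((i : Int)) ∈ x :: L by rw [← hxi]; exact List.mem_cons_self)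
      rw [h1, h2, hix,
        List.getD_eq_getElem _ _ (by omega : x.toNat < (c.set x.toNat (c.getD x.toNat 0 + 1)).length),
        List.getElem_set_self]
      omega
    · have hne : (i : Int) ≠ x := by omega
      have h3 : (if (i : Int) ∈ x :: L then (1 : Int) else 0) = (if (i : Int) ∈ L then 1 else 0) := by
        by_cases h : (i : Int) ∈ L <;> simp [List.mem_cons, hne, h]
      have h4 : (c.set x.toNat (c.getD x.toNat 0 + 1)).getD i 0 = c.getD i 0 := by
        rw [List.getD_eq_getElem _ _ (by omega : i < (c.set x.toNat (c.getD x.toNat 0 + 1)).length),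
          List.getElem_set_ne (by omega : x.toNat ≠ i), ← List.getD_eq_getElem c 0 hi]
      rw [h3, h4]

-- outer loop over bad users: cnt[i] counts the bad users knowing language i
lemma pv_cnt (languages : List (List Int)) (n : Int) (hn : 0 ≤ n)
    (hL : ∀ L ∈ languages, L.Nodup ∧ ∀ x ∈ L, 1 ≤ x ∧ x ≤ n) :
    ∀ (B : List Int) (c : List Int), c.length = (n+1).toNat →
      (∀ u ∈ B, 0 ≤ u ∧ u < (languages.length : Int)) →
      (B.foldl (fun c u =>
        (pvLangs languages u).foldl
          (fun c lang => PySem.List.pySetD c lang (PySem.List.pyGetD c lang 0 + 1)) c) c).length = c.length ∧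
      ∀ i : Nat, i < c.length →
        (B.foldl (fun c u =>
          (pvLangs languages u).foldl
            (fun c lang => PySem.List.pySetD c lang (PySem.List.pyGetD c lang 0 + 1)) c) c).getD i 0
          = c.getD i 0 + (B.countP (fun u => (pvLangs languages u).contains (i : Int)) : Int) := by
  intro B
  induction B with
  | nil => intro c _ _; simp
  | cons u B ih =>
    intro c hclen hB
    obtain ⟨hu0, hulen⟩ := hB u List.mem_cons_self
    have hmemL := pv_langs_mem languages u hu0 hulen
    obtain ⟨hnd, hbnd⟩ := hL _ hmemL
    have hbump := pv_bump (pvLangs languages u) c hnd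
      (by intro x hx; have := hbnd x hx; omega)
    obtain ⟨blen, bget⟩ := hbump
    simp only [List.foldl_cons]
    obtain ⟨ihlen, ihget⟩ := ih _ (by rw [blen, hclen])
      (fun z hz => hB z (List.mem_cons_of_mem _ hz))
    refine ⟨by rw [ihlen, blen], ?_⟩
    intro i hi
    rw [ihget i (by omega), bget i hi, List.countP_cons]
    simp only [List.contains_eq_mem]
    by_cases hm : (i : Int) ∈ pvLangs languages u <;> simp [hm] <;> omega

-- min over (L - g x) is L minus the running max of g
lemma pv_foldl_min_sub (g : Int → Int) :
    ∀ (R : List Int) (L a : Int),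
      R.foldl (fun best x => if L - g x < best then L - g x else best) (L - a)
        = L - R.foldl (fun m x => max m (g x)) a := by
  intro R
  induction R with
  | nil => intro L a; simp
  | cons r R ih =>
    intro L a
    simp only [List.foldl_cons]
    have h1 : (if L - g r < L - a then L - g r else L - a) = L - max a (g r) := by
      split_ifs <;> omega
    rw [h1, ih]

lemma pv_foldl_max_le (g : Int → Int) :
    ∀ (R : List Int) (a b : Int), a ≤ b → (∀ x ∈ R, g x ≤ b) →
      R.foldl (fun m x => max m (g x)) a ≤ b := by
  intro R
  induction R with
  | nil => intro a b hab _; simpa using hab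
  | cons r R ih =>
    intro a b hab hR
    simp only [List.foldl_cons]
    exact ih _ _ (by have := hR r List.mem_cons_self; omega)
      (fun x hx => hR x (List.mem_cons_of_mem _ hx))

-- ===== VERDICT (by name: the statement is the Claim_ definition above) =====
theorem minimumTeachings_spec : Claim_equal_minimumTeachings := by
  unfold Claim_equal_minimumTeachings
  intro n languages friendships _ hpre
  unfold Spec_minimumTeachings minimumTeachings minimumTeachings_alt
  rcases hpre with ⟨hn, hf, hL⟩ | hshare
  case inr => rw [pv_bad_nil languages friendships hshare]; rfl
  set b : PySem.Set Int := friendships.foldl (pvBadStep languages) PySem.Set.empty with hbdef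
  by_cases hb0 : b = []
  · simp [hb0]
  · simp only [hb0, if_false]
    have hbm : ∀ y ∈ b, 0 ≤ y ∧ y < (languages.length : Int) :=
      pv_bad_mem languages friendships PySem.Set.empty hf (by simp [PySem.Set.empty])
    set N : Nat := (n+1).toNat with hN
    have hN1 : 1 ≤ N := by omega
    set K : Int → Int :=
      fun lang => ((b : List Int).countP (fun u => (pvLangs languages u).contains lang) : Int) with hK
    -- characterize cnt
    obtain ⟨hclen, hcget⟩ := pv_cnt languages n hn hL b (List.replicate N 0) (by simp [hN]) hbm
    set cnt : List Int := (b : List Int).foldl (fun c u =>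
        (pvLangs languages u).foldl
          (fun c lang => PySem.List.pySetD c lang (PySem.List.pyGetD c lang 0 + 1)) c)
      (List.replicate N 0) with hcnt
    have hclen' : cnt.length = N := by simpa using hclen
    have hcval : ∀ i : Nat, i < N → cnt.getD i 0 = K (i : Int) := by
      intro i hi
      rw [hcget i (by simpa using hi)]
      simp [K]
    have hcne : cnt ≠ [] := by
      intro h; rw [h] at hclen'; simp at hclen'; omega
    -- the maximum of cnt
    obtain ⟨m, hm⟩ : ∃ m, PySem.List.max? cnt (fun x => x) = some m := by
      cases hmx : PySem.List.max? cnt (fun x => x) with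
      | none => exact absurd ((PySem.List.max?_eq_none_iff _ _).mp hmx) hcne
      | some m => exact ⟨m, rfl⟩
    have hmmem : m ∈ cnt := PySem.List.max?_mem hm
    have hmmax : ∀ y ∈ cnt, y ≤ m := PySem.List.max?_isMax hm
    -- translate membership in cnt to values of K
    have hcntmem : ∀ y ∈ cnt, ∃ i : Nat, i < N ∧ y = K (i : Int) := by
      intro y hy
      obtain ⟨i, hi, hget⟩ := List.mem_iff_getElem.mp hy
      refine ⟨i, by omega, ?_⟩
      rw [← hget, ← List.getD_eq_getElem cnt 0 hi, hcval i (by omega)]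
    have hKmem : ∀ i : Nat, i < N → K (i : Int) ∈ cnt := by
      intro i hi
      rw [← hcval i hi, List.getD_eq_getElem cnt 0 (by omega)]
      exact List.getElem_mem _
    have hK0 : K 0 = 0 := by
      simp only [hK, Int.natCast_eq_zero, List.countP_eq_zero]
      intro u hu
      obtain ⟨hu0, hulen⟩ := hbm u hu
      obtain ⟨_, hbnd⟩ := hL _ (pv_langs_mem languages u hu0 hulen)
      simp only [List.contains_eq_mem, decide_eq_true_eq]
      intro h0; have := hbnd 0 h0; omega
    have hKnn : ∀ lang, 0 ≤ K lang := by intro lang; simp [hK]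
    set L : Int := ((b : List Int).length : Int) with hLdef
    -- rewrite B's loop body: need = L - K lang
    have hneed : ∀ lang : Int,
        (((b : List Int).countP (fun u => !((pvLangs languages u).contains lang)) : Nat) : Int)
          = L - K lang := by
      intro lang
      have h1 := List.length_eq_countP_add_countP
        (p := fun u => (pvLangs languages u).contains lang) (l := (b : List Int))
      have h2 : (b : List Int).countP (fun u => !((pvLangs languages u).contains lang))
          = (b : List Int).countP (fun a => decide ¬((pvLangs languages a).contains lang = true)) := by
        apply List.countP_congr; intro a _; simp
      simp only [hK, hLdef, h2]
      omega
    have hstep : (fun (best lang : Int) =>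
        if (((b : List Int).countP (fun u => !((pvLangs languages u).contains lang)) : Nat) : Int) < best
        then (((b : List Int).countP (fun u => !((pvLangs languages u).contains lang)) : Nat) : Int)
        else best)
        = fun best lang => if L - K lang < best then L - K lang else best := by
      funext best lang; rw [hneed lang]
    rw [hm, Option.getD_some, hstep]
    have hmin := pv_foldl_min_sub K (PySem.List.pyRange 1 (n+1) 1) L 0
    rw [sub_zero] at hmin
    rw [hmin]
    set Mx : Int := (PySem.List.pyRange 1 (n+1) 1).foldl (fun m x => max m (K x)) 0 with hMx
    have hMxle : Mx ≤ m := by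
      apply pv_foldl_max_le
      · obtain ⟨i, hi, hy⟩ := hcntmem m hmmem
        rw [hy]; exact hKnn _
      · intro lang hlang
        have hrange := (PySem.List.mem_pyRange_one).1 hlang
        have hlt : lang.toNat < N := by omega
        have : K lang ∈ cnt := by
          have := hKmem lang.toNat hlt
          rwa [Int.toNat_of_nonneg (by omega)] at this
        exact hmmax _ this
    have hleMx : m ≤ Mx := by
      obtain ⟨i, hi, hy⟩ := hcntmem m hmmem
      rcases Nat.eq_zero_or_pos i with h0 | hpos
      · subst h0
        rw [hy]
        simp only [Int.natCast_zero] at hK0 ⊢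
        rw [hK0]
        exact (PySem.List.le_foldl_max_int _ _ _).1
      · have : (i : Int) ∈ PySem.List.pyRange 1 (n+1) 1 := by
          rw [PySem.List.mem_pyRange_one]; omega
        rw [hy]
        exact (PySem.List.le_foldl_max_int _ _ _).2 _ this
    rw [le_antisymm hleMx hMxle]
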